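-- pv_equiv track=rewrite | github.com/Surxe/WRFrontiersDB-Data | src/content_timeline_generator.py | strip_list
-- ===== SOURCE A (Python) =====
-- def strip_list(list_of_str: list[str]) -> list[str]:
--     if not list_of_str:
--         return list_of_str
--     first_elem = list_of_str[0]
--     if first_elem.isspace() or first_elem == '':
--         return strip_list(list_of_str[1:])
--     last_elem = list_of_str[-1]
--     if last_elem.isspace() or last_elem == '':
--         return strip_list(list_of_str[:-1])
--     return list_of_str
-- ===== SOURCE B (Python) =====
-- def _drop_blank(xs):
--     for i, s in enumerate(xs):
--         if not (s.isspace() or s == ''):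
--             return xs[i:]
--     return []
--
-- def strip_list(list_of_str: list[str]) -> list[str]:
--     rev_tail_trimmed = _drop_blank(list_of_str[::-1])
--     return _drop_blank(rev_tail_trimmed[::-1])
-- ===== Notes on version B (the rewrite author's own statement) =====
-- stated objective: alternative
-- what changed: Replaced A's recursion that re-slices the list to remove one blank end element at a time with two drop-leading-blank passes (one on the reversed list, one on the front); worst-case linear instead of quadratic, but not measurably faster on typical inputs with few blank ends.
import Mathlib
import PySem

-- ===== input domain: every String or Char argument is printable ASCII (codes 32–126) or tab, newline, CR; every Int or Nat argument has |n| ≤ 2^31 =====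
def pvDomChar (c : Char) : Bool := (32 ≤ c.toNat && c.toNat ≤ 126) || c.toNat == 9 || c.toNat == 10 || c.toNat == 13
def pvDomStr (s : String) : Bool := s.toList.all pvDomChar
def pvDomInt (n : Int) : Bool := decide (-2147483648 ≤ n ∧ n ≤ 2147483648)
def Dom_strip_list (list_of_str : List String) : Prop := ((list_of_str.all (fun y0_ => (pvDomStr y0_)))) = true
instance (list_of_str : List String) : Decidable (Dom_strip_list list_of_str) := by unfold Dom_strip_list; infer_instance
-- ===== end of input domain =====

-- B replaces A's one-blank-at-a-time recursive re-slicing with two drop-leading-blank passes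
-- (on the reversed list, then on the front): objective = alternative decomposition.


-- ===== PORT A =====
-- s.isspace() or s == ''
def pvBlank (s : String) : Bool := PySem.Str.strIsspace s || s == ""

-- literal port of A's recursion: xs[0] is the head, xs[1:] the tail,
-- xs[-1] on a nonempty list is getLastD, xs[:-1] is dropLast (exact for lists)
def strip_list (list_of_str : List String) : List String :=
  match list_of_str with
  | [] => []
  | first :: rest =>
    if pvBlank first then strip_list rest
    else
      if pvBlank ((first :: rest).getLastD "") then strip_list ((first :: rest).dropLast)
      else first :: rest
termination_by list_of_str.length
decreasing_by
  · simp
  · simp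

-- ===== PORT B =====
-- port of Source B's _drop_blank: scan for the first non-blank element, return the suffix from there
def pvDropBlank (xs : List String) : List String :=
  match xs with
  | [] => []
  | s :: rest => if pvBlank s then pvDropBlank rest else s :: rest

def strip_list_alt (list_of_str : List String) : List String :=
  pvDropBlank ((pvDropBlank list_of_str.reverse).reverse)

-- ===== PRECONDITION & SPEC =====
def Spec_strip_list (list_of_str : List String) (out : List String) : Prop := out = strip_list_alt list_of_str
instance (list_of_str : List String) (out : List String) : Decidable (Spec_strip_list list_of_str out) := by unfold Spec_strip_list; infer_instance

-- ===== CLAIM (what is proved, stated in full; the proofs are below) =====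
def Claim_equal_strip_list : Prop := ∀ (list_of_str : List String), Dom_strip_list list_of_str → Spec_strip_list list_of_str (strip_list list_of_str)

-- ===== LEMMAS AND PROOFS =====

theorem pvDropBlank_append (xs ys : List String) :
    pvDropBlank (xs ++ ys) =
      if pvDropBlank xs = [] then pvDropBlank ys else pvDropBlank xs ++ ys := by
  induction xs with
  | nil => simp [pvDropBlank]
  | cons s rest ih =>
    by_cases h : pvBlank s = true
    · simpa [pvDropBlank, h] using ih
    · simp [pvDropBlank, h]

theorem reverse_eq_getLastD_cons (first : String) (rest : List String) :
    (first :: rest).reverse =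
      (first :: rest).getLastD "" :: (first :: rest).dropLast.reverse := by
  induction rest generalizing first with
  | nil => simp
  | cons b t ih =>
    have h := ih b
    simp only [List.reverse_cons] at h ⊢
    rw [h]
    simp

theorem strip_list_eq_alt : ∀ (n : ℕ) (xs : List String), xs.length ≤ n →
    strip_list xs = strip_list_alt xs := by
  intro n
  induction n with
  | zero =>
    intro xs h
    have : xs = [] := List.length_eq_zero_iff.mp (Nat.le_zero.mp h)
    subst this
    simp [strip_list, strip_list_alt, pvDropBlank]
  | succ n ih =>
    intro xs hlen
    match xs with
    | [] => simp [strip_list, strip_list_alt, pvDropBlank]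
    | first :: rest =>
      have hr : rest.length ≤ n := by simpa using Nat.lt_succ_iff.mp (by simpa using hlen)
      by_cases h1 : pvBlank first = true
      · -- A drops the head; show B's value is unchanged by a blank head
        rw [strip_list]
        rw [if_pos h1, ih rest hr]
        unfold strip_list_alt
        rw [List.reverse_cons, pvDropBlank_append]
        by_cases h2 : pvDropBlank rest.reverse = []
        · simp [h2, pvDropBlank, h1]
        · rw [if_neg h2]
          simp [pvDropBlank, h1]
      · set last := (first :: rest).getLastD "" with hlast
        have hrev := reverse_eq_getLastD_cons first rest
        by_cases h2 : pvBlank last = true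
        · -- A drops the last element; B's right pass drops it too
          rw [strip_list]
          rw [if_neg h1, if_pos h2]
          have hd : (first :: rest).dropLast.length ≤ n := by
            simp at hlen ⊢; omega
          rw [ih _ hd]
          unfold strip_list_alt
          rw [hrev, ← hlast, pvDropBlank, if_pos h2]
        · -- neither end is blank: both return the list unchanged
          rw [strip_list]
          rw [if_neg h1, if_neg h2]
          unfold strip_list_alt
          rw [hrev, ← hlast, pvDropBlank, if_neg h2, hlast, ← hrev]
          simp [pvDropBlank, h1]

-- ===== VERDICT (by name: the statement is the Claim_ definition above) =====
theorem strip_list_spec : Claim_equal_strip_list := by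
  intro xs _
  unfold Spec_strip_list
  exact strip_list_eq_alt xs.length xs le_rfl
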